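-- pv_equiv track=rewrite | github.com/ZermZhang/StudyRecord | src/LeetCode/Prefix/distinctNames.py | distinctNames_v3
-- ===== SOURCE A (Python) =====
-- from typing import List
--
-- def distinctNames_v3(ideas: List[str]) -> int:
--     from collections import defaultdict
--
--     # 统计左右的idea的首字母分布情况，并记录
--     # 注意这里记录的是除了首字母之外的idea剩下的部分
--     dct = defaultdict(set)
--     for idea in ideas:
--         dct[idea[0]].add(idea[1:])
--
--     arr = list(dct.keys())
--
--     count = 0
--     # 对所有可能首字母进行双向遍历
--     for i in range(len(dct)):
--         for j in range(i + 1, len(dct)):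
--             count += (
--                 # 注意这里的操作，两个set， A - B，会保留A里面存在但是B里不存在的元素
--                 # 即dct[arr[i]] - dct[arr[j]]，会保留arr[i](首字母) + dct[arr[j]]（后缀）不属于idea中的值
--                 len(dct[arr[i]] - dct[arr[j]]) * len(dct[arr[j]] - dct[arr[i]]) * 2
--             )
--     return count
-- ===== SOURCE B (Python) =====
-- from typing import List
--
-- def distinctNames_v3(ideas: List[str]) -> int:
--     # Invert the grouping: map each suffix to the (deduped, first-seen order) list
--     # of first letters that carry it, then count co-occurrences per letter pair once.
--     inv = {}
--     letters = []
--     for idea in ideas: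
--         c, s = idea[0], idea[1:]
--         if c not in letters:
--             letters.append(c)
--         ls = inv.setdefault(s, [])
--         if c not in ls:
--             ls.append(c)
--
--     size = {}    # letter -> number of distinct suffixes in its group
--     shared = {}  # canonical letter pair -> number of suffixes shared by both groups
--     for ls in inv.values():
--         for i, a in enumerate(ls):
--             size[a] = size.get(a, 0) + 1
--             for b in ls[i + 1:]:
--                 key = (a, b) if a < b else (b, a)
--                 shared[key] = shared.get(key, 0) + 1
--
--     count = 0
--     for i, a in enumerate(letters):
--         for b in letters[i + 1:]:
--             m = shared.get((a, b) if a < b else (b, a), 0)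
--             count += (size[a] - m) * (size[b] - m) * 2
--     return count
-- ===== Notes on version B (the rewrite author's own statement) =====
-- stated objective: alternative
-- what changed: Instead of A's pairwise set-difference scans over the first-letter groups, B builds an inverted suffix-to-letters index, accumulates per-letter group sizes and per-letter-pair shared-suffix counts in one pass over it, and finishes with an arithmetic pass computing (size_a-shared)*(size_b-shared)*2 per letter pair.
import Mathlib
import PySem

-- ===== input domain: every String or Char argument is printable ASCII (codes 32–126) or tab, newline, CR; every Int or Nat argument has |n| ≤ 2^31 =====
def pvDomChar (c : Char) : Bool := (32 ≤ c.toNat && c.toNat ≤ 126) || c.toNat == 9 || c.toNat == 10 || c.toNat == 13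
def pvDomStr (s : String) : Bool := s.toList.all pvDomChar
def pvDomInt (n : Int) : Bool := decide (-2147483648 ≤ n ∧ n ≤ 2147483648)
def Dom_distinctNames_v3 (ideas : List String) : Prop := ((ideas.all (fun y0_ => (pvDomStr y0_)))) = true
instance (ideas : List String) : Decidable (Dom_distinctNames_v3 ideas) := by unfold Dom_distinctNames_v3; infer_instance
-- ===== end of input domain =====

-- B replaces A's pairwise set-difference scans by an inverted suffix→letters index with
-- per-pair shared counts (alternative algorithm, same exact result).

-- ===== PORT A =====
def distinctNames_v3 (ideas : List String) : Int :=
  -- dct = defaultdict(set); for idea in ideas: dct[idea[0]].add(idea[1:])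
  let dct : PySem.Dict Char (PySem.Set String) :=
    ideas.foldl (fun d idea =>
      match idea.toList with
      | [] => d  -- idea[0] raises IndexError in Python on ""; such inputs are excluded by Pre_
      | c :: rest => d.modify c PySem.Set.empty (fun s => PySem.Set.add s (String.ofList rest)))
      PySem.Dict.empty
  let arr := dct.keys
  let n : Int := PySem.List.len arr  -- len(dct) = len(arr)
  (PySem.List.pyRange 0 n 1).foldl (fun count i =>
    (PySem.List.pyRange (i + 1) n 1).foldl (fun count j =>
      let si := dct.getD (PySem.List.pyGetD arr i ' ') PySem.Set.empty
      let sj := dct.getD (PySem.List.pyGetD arr j ' ') PySem.Set.empty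
      count + PySem.Set.len (PySem.Set.diff si sj) * PySem.Set.len (PySem.Set.diff sj si) * 2)
      count)
    0

-- ===== PORT B =====
-- key = (a, b) if a < b else (b, a)
def canonPair (a b : Char) : Char × Char := if a < b then (a, b) else (b, a)

def distinctNames_v3_alt (ideas : List String) : Int :=
  -- first loop: letters (deduped first letters, in order) and inv (suffix -> deduped letter list)
  let st : PySem.Set Char × PySem.Dict String (PySem.Set Char) :=
    ideas.foldl (fun p idea =>
      match idea.toList with
      | [] => p  -- idea[0] raises IndexError in Python on ""; such inputs are excluded by Pre_
      | c :: rest =>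
        (PySem.Set.add p.1 c,
         p.2.modify (String.ofList rest) PySem.Set.empty (fun ls => PySem.Set.add ls c)))
      (PySem.Set.empty, PySem.Dict.empty)
  let letters := st.1
  let inv := st.2
  -- second loop over inv.values(): accumulate size and shared tables
  let q : PySem.Dict Char Int × PySem.Dict (Char × Char) Int :=
    inv.values.foldl (fun q ls =>
      (PySem.List.enumerate ls).foldl (fun q ia =>
        (q.1.insert ia.2 (q.1.getD ia.2 0 + 1),
         (PySem.List.slice ls (some (ia.1 + 1)) none).foldl (fun sh b =>
           sh.insert (canonPair ia.2 b) (sh.getD (canonPair ia.2 b) 0 + 1)) q.2))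
        q)
      (PySem.Dict.empty, PySem.Dict.empty)
  let size := q.1
  let shared := q.2
  -- final loop: every letter in letters has an entry in size, so size[a] is getD (never a KeyError)
  (PySem.List.enumerate letters).foldl (fun count ia =>
    (PySem.List.slice letters (some (ia.1 + 1)) none).foldl (fun count b =>
      let m := shared.getD (canonPair ia.2 b) 0
      count + (size.getD ia.2 0 - m) * (size.getD b 0 - m) * 2)
      count)
    0

-- ===== PRECONDITION & SPEC =====
-- Pre_ excludes inputs containing the empty string, on which Python A raises IndexError (idea[0]).
def Pre_distinctNames_v3 (ideas : List String) : Prop := ∀ s ∈ ideas, s ≠ ""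
instance (ideas : List String) : Decidable (Pre_distinctNames_v3 ideas) := by
  unfold Pre_distinctNames_v3; infer_instance
def pvWitness_distinctNames_v3 : List String := ["ac", "bc", "bd", "a"]

def Spec_distinctNames_v3 (ideas : List String) (out : Int) : Prop := out = distinctNames_v3_alt ideas
instance (ideas : List String) (out : Int) : Decidable (Spec_distinctNames_v3 ideas out) := by unfold Spec_distinctNames_v3; infer_instance

-- ===== CLAIM (what is proved, stated in full; the proofs are below) =====
def Claim_equal_distinctNames_v3 : Prop := ∀ (ideas : List String), Dom_distinctNames_v3 ideas → Pre_distinctNames_v3 ideas → Spec_distinctNames_v3 ideas (distinctNames_v3 ideas)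

-- ===== LEMMAS AND PROOFS =====

-- (c, s) pairs (first letter, suffix) of the nonempty ideas, in order
def pvFirstRest (idea : String) : Option (Char × String) :=
  match idea.toList with
  | [] => none
  | c :: rest => some (c, String.ofList rest)

def pvPairs (ideas : List String) : List (Char × String) := ideas.filterMap pvFirstRest

def pvDct (ps : List (Char × String)) : PySem.Dict Char (PySem.Set String) :=
  ps.foldl (fun d p => d.modify p.1 PySem.Set.empty (fun s => PySem.Set.add s p.2)) PySem.Dict.empty

def pvInv (ps : List (Char × String)) : PySem.Dict String (PySem.Set Char) :=
  ps.foldl (fun d p => d.modify p.2 PySem.Set.empty (fun s => PySem.Set.add s p.1)) PySem.Dict.empty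

-- ordered pairs (i < j) of a list
def pvPairsOf {α : Type} : List α → List (α × α)
  | [] => []
  | a :: t => t.map (fun b => (a, b)) ++ pvPairsOf t

-- ---- generic grouping-fold facts ----

theorem pv_mem_getD_groupFold {κ α : Type} [BEq κ] [LawfulBEq κ] [DecidableEq κ] [BEq α] [LawfulBEq α]
    (l : List (κ × α)) (d : PySem.Dict κ (PySem.Set α)) (k : κ) (x : α) :
    x ∈ (l.foldl (fun d p => d.modify p.1 PySem.Set.empty (fun s => PySem.Set.add s p.2)) d).getD k PySem.Set.empty
      ↔ x ∈ d.getD k PySem.Set.empty ∨ (k, x) ∈ l := by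
  induction l generalizing d with
  | nil => simp
  | cons p t ih =>
    simp only [List.foldl_cons, ih, PySem.Dict.getD_modify]
    by_cases h : k = p.1
    · subst h
      simp [PySem.Set.mem_add]
      constructor
      · rintro (⟨h1 | h2⟩ | h3)
        · exact Or.inl h1
        · subst h2; exact Or.inr (Or.inl rfl)
        · exact Or.inr (Or.inr h3)
      · rintro (h1 | h2 | h3)
        · exact Or.inl (Or.inl h1)
        · rcases p with ⟨pa, pb⟩; cases h2; exact Or.inl (Or.inr rfl)
        · exact Or.inr h3
    · simp only [if_neg h]
      constructor
      · rintro (h1 | h2)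
        · exact Or.inl h1
        · exact Or.inr (List.mem_cons_of_mem _ h2)
      · rintro (h1 | h2)
        · exact Or.inl h1
        · rcases List.mem_cons.mp h2 with h2 | h2
          · exact absurd (by rw [← h2]) h
          · exact Or.inr h2

theorem pv_nodup_getD_groupFold {κ α : Type} [BEq κ] [LawfulBEq κ] [DecidableEq κ] [BEq α] [LawfulBEq α]
    (l : List (κ × α)) (d : PySem.Dict κ (PySem.Set α)) (k : κ)
    (h : ∀ k', ((d.getD k' PySem.Set.empty : PySem.Set α)).Nodup) :
    ((l.foldl (fun d p => d.modify p.1 PySem.Set.empty (fun s => PySem.Set.add s p.2)) d).getD k PySem.Set.empty : PySem.Set α).Nodup := by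
  induction l generalizing d with
  | nil => exact h k
  | cons p t ih =>
    simp only [List.foldl_cons]
    apply ih
    intro k'
    rw [PySem.Dict.getD_modify]
    split_ifs with hk
    · exact PySem.Set.nodup_add _ _ (h p.1)
    · exact h k'

-- ---- step 0: the ports' first loops in terms of pvPairs ----

theorem pvA_dct_eq (ideas : List String) :
    (ideas.foldl (fun d idea =>
      match idea.toList with
      | [] => d
      | c :: rest => d.modify c PySem.Set.empty (fun s => PySem.Set.add s (String.ofList rest)))
      PySem.Dict.empty) = pvDct (pvPairs ideas) := by
  unfold pvDct pvPairs
  rw [List.foldl_filterMap]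
  apply PySem.List.foldl_congr_mem
  intro acc x hx
  cases h : x.toList <;> simp [pvFirstRest, h]

theorem pvB_first_eq (ideas : List String) :
    (ideas.foldl (fun (p : PySem.Set Char × PySem.Dict String (PySem.Set Char)) idea =>
      match idea.toList with
      | [] => p
      | c :: rest =>
        (PySem.Set.add p.1 c,
         p.2.modify (String.ofList rest) PySem.Set.empty (fun ls => PySem.Set.add ls c)))
      (PySem.Set.empty, PySem.Dict.empty))
    = (PySem.Set.ofList ((pvPairs ideas).map Prod.fst), pvInv (pvPairs ideas)) := by
  have h1 : (ideas.foldl (fun (p : PySem.Set Char × PySem.Dict String (PySem.Set Char)) idea =>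
      match idea.toList with
      | [] => p
      | c :: rest =>
        (PySem.Set.add p.1 c,
         p.2.modify (String.ofList rest) PySem.Set.empty (fun ls => PySem.Set.add ls c)))
      (PySem.Set.empty, PySem.Dict.empty))
      = ((pvPairs ideas).foldl
          (fun (p : PySem.Set Char × PySem.Dict String (PySem.Set Char)) (q : Char × String) =>
            (PySem.Set.add p.1 q.1, p.2.modify q.2 PySem.Set.empty (fun ls => PySem.Set.add ls q.1)))
          (PySem.Set.empty, PySem.Dict.empty)) := by
    unfold pvPairs
    rw [List.foldl_filterMap]
    apply PySem.List.foldl_congr_mem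
    intro acc x hx
    cases h : x.toList <;> simp [pvFirstRest, h]
  rw [h1]
  rw [PySem.List.foldl_prod_mk
    (f := fun (L : PySem.Set Char) (q : Char × String) => PySem.Set.add L q.1)
    (g := fun (d : PySem.Dict String (PySem.Set Char)) (q : Char × String) =>
      d.modify q.2 PySem.Set.empty (fun ls => PySem.Set.add ls q.1))]
  congr 1
  rw [← PySem.Set.update_map_eq_foldl_add]
  exact PySem.Set.update_empty _

theorem pvA_keys (ps : List (Char × String)) :
    (pvDct ps).keys = PySem.Set.ofList (ps.map Prod.fst) := by
  unfold pvDct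
  rw [PySem.Dict.keys_foldl_modify_key ps Prod.fst PySem.Set.empty
    (fun _ p => fun s => PySem.Set.add s p.2)]
  simp [PySem.Dict.keys_empty, PySem.Set.update_nil_left]

theorem pvInv_keys (ps : List (Char × String)) :
    (pvInv ps).keys = PySem.Set.ofList (ps.map Prod.snd) := by
  unfold pvInv
  rw [PySem.Dict.keys_foldl_modify_key ps Prod.snd PySem.Set.empty
    (fun _ p => fun s => PySem.Set.add s p.1)]
  simp [PySem.Dict.keys_empty, PySem.Set.update_nil_left]

-- ---- loop-shape: enumerate + slice double loop = fold over ordered pairs ----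

theorem pv_enum_slice_foldl_aux {β : Type} (full : List Char) (g : β → Char → Char → β) :
    ∀ (t : List Char) (k : Nat), full.drop k = t → ∀ (d0 : β),
    (PySem.List.enumerate t (k : Int)).foldl (fun d ia =>
      (PySem.List.slice full (some (ia.1 + 1)) none).foldl (fun d b => g d ia.2 b) d) d0
    = (pvPairsOf t).foldl (fun d p => g d p.1 p.2) d0 := by
  intro t
  induction t with
  | nil => intro k h d0; simp [PySem.List.enumerate, pvPairsOf]
  | cons a t ih =>
    intro k h d0
    have hk1 : full.drop (k + 1) = t := by
      rw [← List.tail_drop, h]; rfl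
    have hslice : PySem.List.slice full (some ((k : Int) + 1)) none = t := by
      have hc : ((k : Int) + 1) = ((k + 1 : Nat) : Int) := by push_cast; ring
      rw [hc, PySem.List.slice_from_natCast, hk1]
    simp only [PySem.List.enumerate, List.foldl_cons, hslice]
    have hinner : ∀ (d : β), t.foldl (fun d b => g d a b) d
        = (t.map (fun b => (a, b))).foldl (fun d p => g d p.1 p.2) d := by
      intro d; rw [List.foldl_map]
    rw [hinner]
    have hc : ((k : Int) + 1) = ((k + 1 : Nat) : Int) := by push_cast; ring
    rw [hc, ih (k + 1) hk1]
    simp only [pvPairsOf, List.foldl_append]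

theorem pv_enum_slice_foldl {β : Type} (xs : List Char) (g : β → Char → Char → β) (d0 : β) :
    (PySem.List.enumerate xs).foldl (fun d ia =>
      (PySem.List.slice xs (some (ia.1 + 1)) none).foldl (fun d b => g d ia.2 b) d) d0
    = (pvPairsOf xs).foldl (fun d p => g d p.1 p.2) d0 := by
  have h := pv_enum_slice_foldl_aux xs g xs 0 (by simp) d0
  simpa using h

-- ---- loop-shape: pyRange-indexed double loop of port A = fold over ordered pairs ----

theorem pv_pyRange_map_getD (xs : List Char) :
    ∀ (t : List Char) (k : Nat), xs.drop k = t →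
    (PySem.List.pyRange (k : Int) (PySem.List.len xs) 1).map (fun j => PySem.List.pyGetD xs j ' ') = t := by
  intro t
  induction t with
  | nil =>
    intro k h
    have hlen : xs.length ≤ k := by
      have := List.drop_eq_nil_iff.mp h; omega
    rw [PySem.List.pyRange_one_eq_nil (by simp [PySem.List.len_eq]; exact_mod_cast hlen)]
    rfl
  | cons a t ih =>
    intro k h
    have hk1 : xs.drop (k + 1) = t := by rw [← List.tail_drop, h]; rfl
    have hlt : k < xs.length := by
      by_contra hc
      rw [List.drop_eq_nil_iff.mpr (by omega)] at h
      exact absurd h.symm (List.cons_ne_nil a t)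
    rw [PySem.List.pyRange_one_cons (by simp [PySem.List.len_eq]; exact_mod_cast hlt)]
    rw [List.map_cons]
    have hhead : PySem.List.pyGetD xs (k : Int) ' ' = a := by
      have h0 : xs[k]? = some a := by
        have : (xs.drop k)[0]? = xs[k + 0]? := List.getElem?_drop
        rw [h] at this; simpa using this.symm
      simp [PySem.List.pyGetD_natCast, List.getD, h0]
    have hc : ((k : Int) + 1) = ((k + 1 : Nat) : Int) := by push_cast; ring
    rw [hhead, hc, ih (k + 1) hk1]

theorem pv_pyRange_pairs_aux {β : Type} (xs : List Char) (g : β → Char → Char → β) :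
    ∀ (t : List Char) (k : Nat), xs.drop k = t → ∀ (d0 : β),
    (PySem.List.pyRange (k : Int) (PySem.List.len xs) 1).foldl (fun d i =>
      (PySem.List.pyRange (i + 1) (PySem.List.len xs) 1).foldl (fun d j =>
        g d (PySem.List.pyGetD xs i ' ') (PySem.List.pyGetD xs j ' ')) d) d0
    = (pvPairsOf t).foldl (fun d p => g d p.1 p.2) d0 := by
  intro t
  induction t with
  | nil =>
    intro k h d0
    have hlen : xs.length ≤ k := by
      have := List.drop_eq_nil_iff.mp h; omega
    rw [PySem.List.pyRange_one_eq_nil (by simp [PySem.List.len_eq]; exact_mod_cast hlen)]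
    rfl
  | cons a t ih =>
    intro k h d0
    have hk1 : xs.drop (k + 1) = t := by rw [← List.tail_drop, h]; rfl
    have hlt : k < xs.length := by
      by_contra hc
      rw [List.drop_eq_nil_iff.mpr (by omega)] at h
      exact absurd h.symm (List.cons_ne_nil a t)
    have hhead : PySem.List.pyGetD xs (k : Int) ' ' = a := by
      have h0 : xs[k]? = some a := by
        have : (xs.drop k)[0]? = xs[k + 0]? := List.getElem?_drop
        rw [h] at this; simpa using this.symm
      simp [PySem.List.pyGetD_natCast, List.getD, h0]
    have hc : ((k : Int) + 1) = ((k + 1 : Nat) : Int) := by push_cast; ring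
    rw [PySem.List.pyRange_one_cons (by simp [PySem.List.len_eq]; exact_mod_cast hlt)]
    rw [List.foldl_cons, hhead, hc]
    have hinner : ∀ (d : β),
        (PySem.List.pyRange ((k + 1 : Nat) : Int) (PySem.List.len xs) 1).foldl
          (fun d j => g d a (PySem.List.pyGetD xs j ' ')) d
        = (t.map (fun b => (a, b))).foldl (fun d p => g d p.1 p.2) d := by
      intro d
      rw [← pv_pyRange_map_getD xs t (k + 1) hk1, List.foldl_map, List.foldl_map]
    rw [hinner, ih (k + 1) hk1]
    simp only [pvPairsOf, List.foldl_append]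

-- ---- the size and shared tables, pointwise ----

theorem pv_size_getD (vals : List (PySem.Set Char)) (d : PySem.Dict Char Int) (a : Char) :
    (vals.foldl (fun d ls => ls.foldl (fun d c => d.insert c (d.getD c 0 + 1)) d) d).getD a 0
    = d.getD a 0 + (vals.map (fun ls => (ls.count a : Int))).sum := by
  induction vals generalizing d with
  | nil => simp
  | cons ls rest ih =>
    simp only [List.foldl_cons, List.map_cons, List.sum_cons]
    rw [ih, PySem.Dict.getD_foldl_insert_add_one]
    ring

theorem pv_shared_getD (vals : List (PySem.Set Char)) (d : PySem.Dict (Char × Char) Int) (k : Char × Char) :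
    (vals.foldl (fun d ls => (pvPairsOf ls).foldl (fun d p =>
        d.insert (canonPair p.1 p.2) (d.getD (canonPair p.1 p.2) 0 + 1)) d) d).getD k 0
    = d.getD k 0 + (vals.map (fun ls => (((pvPairsOf ls).map (fun p => canonPair p.1 p.2)).count k : Int))).sum := by
  induction vals generalizing d with
  | nil => simp
  | cons ls rest ih =>
    simp only [List.foldl_cons, List.map_cons, List.sum_cons]
    rw [ih]
    have : (pvPairsOf ls).foldl (fun d p =>
        d.insert (canonPair p.1 p.2) (d.getD (canonPair p.1 p.2) 0 + 1)) d
        = ((pvPairsOf ls).map (fun p => canonPair p.1 p.2)).foldl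
            (fun d x => d.insert x (d.getD x 0 + 1)) d := by
      rw [List.foldl_map]
    rw [this, PySem.Dict.getD_foldl_insert_add_one]
    ring

-- ---- counting ordered pairs of a nodup list ----

theorem pv_canon_eq (a b x y : Char) (hxy : x < y) :
    canonPair a b = (x, y) ↔ (a = x ∧ b = y) ∨ (a = y ∧ b = x) := by
  unfold canonPair
  split_ifs with hab
  · simp only [Prod.mk.injEq]
    constructor
    · exact fun h => Or.inl h
    · rintro (h | ⟨h1, h2⟩)
      · exact h
      · subst h1; subst h2; exact absurd hab (lt_asymm hxy)
  · simp only [Prod.mk.injEq]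
    constructor
    · exact fun h => Or.inr ⟨h.2, h.1⟩
    · rintro (⟨h1, h2⟩ | h)
      · subst h1; subst h2; exact absurd hxy (fun hcon => hab hcon)
      · exact ⟨h.2, h.1⟩

theorem pv_pairsOf_canon_count (x y : Char) (hxy : x < y) :
    ∀ (ls : List Char), ls.Nodup →
    ((pvPairsOf ls).map (fun p => canonPair p.1 p.2)).count (x, y)
    = if x ∈ ls ∧ y ∈ ls then 1 else 0 := by
  intro ls
  induction ls with
  | nil => intro _; simp [pvPairsOf]
  | cons a t ih =>
    intro hnd
    have hat : a ∉ t := (List.nodup_cons.mp hnd).1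
    have hndt : t.Nodup := (List.nodup_cons.mp hnd).2
    have hxney : x ≠ y := ne_of_lt hxy
    simp only [pvPairsOf, List.map_append, List.count_append, List.map_map]
    have hmap : (t.map ((fun p => canonPair p.1 p.2) ∘ (fun b => (a, b)))).count (x, y)
        = t.countP (fun b => canonPair a b == (x, y)) := by
      rw [List.count_eq_countP, List.countP_map]
      apply List.countP_congr
      intro b _
      simp [Function.comp]
    rw [hmap, ih hndt]
    by_cases hax : a = x
    · subst hax
      have h1 : t.countP (fun b => canonPair a b == (a, y)) = t.count y := by
        rw [List.count_eq_countP]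
        apply List.countP_congr
        intro b _
        simp only [beq_iff_eq]
        rw [pv_canon_eq a b a y hxy]
        constructor
        · rintro (⟨_, h⟩ | ⟨h1, _⟩)
          · exact h
          · exact absurd h1 (ne_of_lt hxy)
        · intro h; exact Or.inl ⟨rfl, h⟩
      rw [h1]
      have hy2 : ¬ y = a := fun h => absurd hxy (by rw [h]; exact lt_irrefl a)
      by_cases hyt : y ∈ t
      · rw [List.count_eq_one_of_mem hndt hyt]
        simp [hat, hyt, List.mem_cons]
      · rw [List.count_eq_zero.mpr hyt]
        simp [hat, hyt, hy2, List.mem_cons]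
    · by_cases hay : a = y
      · subst hay
        have h1 : t.countP (fun b => canonPair a b == (x, a)) = t.count x := by
          rw [List.count_eq_countP]
          apply List.countP_congr
          intro b _
          simp only [beq_iff_eq]
          rw [show ((x, a) : Char × Char) = (x, a) from rfl, pv_canon_eq a b x a hxy]
          constructor
          · rintro (⟨h1, _⟩ | ⟨_, h⟩)
            · exact absurd h1.symm (ne_of_lt hxy)
            · exact h
          · intro h; exact Or.inr ⟨rfl, h⟩
        rw [h1]
        have hx2 : ¬ x = a := fun h => absurd hxy (by rw [h]; exact lt_irrefl a)
        by_cases hxt : x ∈ t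
        · rw [List.count_eq_one_of_mem hndt hxt]
          simp [hat, hxt, List.mem_cons]
        · rw [List.count_eq_zero.mpr hxt]
          simp [hat, hxt, hx2, List.mem_cons]
      · have h1 : t.countP (fun b => canonPair a b == (x, y)) = 0 := by
          rw [List.countP_eq_zero]
          intro b _
          simp only [beq_iff_eq]
          rw [pv_canon_eq a b x y hxy]
          rintro (⟨h, _⟩ | ⟨h, _⟩)
          · exact hax h
          · exact hay h
        rw [h1]
        have hx2 : ¬ x = a := fun h => hax h.symm
        have hy2 : ¬ y = a := fun h => hay h.symm
        simp [List.mem_cons, hx2, hy2]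

theorem pv_pairsOf_ne {α : Type} (xs : List α) (h : xs.Nodup) :
    ∀ p ∈ pvPairsOf xs, p.1 ≠ p.2 := by
  induction xs with
  | nil => intro p hp; simp [pvPairsOf] at hp
  | cons a t ih =>
    intro p hp
    simp only [pvPairsOf, List.mem_append, List.mem_map] at hp
    rcases hp with ⟨b, hb, rfl⟩ | hp
    · intro hcon
      simp only at hcon
      subst hcon
      exact (List.nodup_cons.mp h).1 hb
    · exact ih (List.nodup_cons.mp h).2 p hp

-- ---- tying group sizes/intersections to the inverted index ----

-- the suffix group of letter a, as a plain list
def pvGrp (ps : List (Char × String)) (a : Char) : PySem.Set String :=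
  (pvDct ps).getD a PySem.Set.empty

theorem pv_mem_grp (ps : List (Char × String)) (a : Char) (s : String) :
    s ∈ pvGrp ps a ↔ (a, s) ∈ ps := by
  unfold pvGrp pvDct
  rw [pv_mem_getD_groupFold]
  simp

theorem pv_nodup_grp (ps : List (Char × String)) (a : Char) : (pvGrp ps a).Nodup := by
  unfold pvGrp pvDct
  apply pv_nodup_getD_groupFold
  intro k'
  simp

theorem pv_inv_eq_groupFold (ps : List (Char × String)) :
    pvInv ps = (ps.map (fun p => (p.2, p.1))).foldl
      (fun d p => d.modify p.1 PySem.Set.empty (fun s => PySem.Set.add s p.2)) PySem.Dict.empty := by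
  unfold pvInv
  rw [List.foldl_map]

theorem pv_mem_inv (ps : List (Char × String)) (s : String) (c : Char) :
    c ∈ (pvInv ps).getD s PySem.Set.empty ↔ (c, s) ∈ ps := by
  rw [pv_inv_eq_groupFold, pv_mem_getD_groupFold]
  simp only [PySem.Dict.getD_empty]
  constructor
  · rintro (h | h)
    · simp at h
    · rcases List.mem_map.mp h with ⟨⟨p1, p2⟩, hp, heq⟩
      cases heq
      exact hp
  · intro h
    exact Or.inr (List.mem_map.mpr ⟨(c, s), h, rfl⟩)

theorem pv_nodup_inv (ps : List (Char × String)) (s : String) :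
    ((pvInv ps).getD s PySem.Set.empty : PySem.Set Char).Nodup := by
  rw [pv_inv_eq_groupFold]
  apply pv_nodup_getD_groupFold
  intro k'
  simp

theorem pv_nodup_inv_keys (ps : List (Char × String)) : (pvInv ps).keys.Nodup := by
  rw [pvInv_keys]
  exact PySem.Set.nodup_ofList _

theorem pv_vals_eq (ps : List (Char × String)) :
    (pvInv ps).values = ((pvInv ps).keys).map (fun s => (pvInv ps).getD s PySem.Set.empty) := by
  show ((pvInv ps).items).map (fun x => x.2) = _
  rw [PySem.Dict.items_eq_map_keys _ (pv_nodup_inv_keys ps) PySem.Set.empty, List.map_map]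
  rfl

def pvKeyCnt (ps : List (Char × String)) (a b : Char) : Nat :=
  ((pvInv ps).keys).countP (fun s => decide ((a, s) ∈ ps ∧ (b, s) ∈ ps))

theorem pv_grp_len (ps : List (Char × String)) (a : Char) :
    (pvGrp ps a).length = ((pvInv ps).keys).countP (fun s => decide ((a, s) ∈ ps)) := by
  rw [List.countP_eq_length_filter]
  apply List.Perm.length_eq
  rw [List.perm_ext_iff_of_nodup (pv_nodup_grp ps a) ((pv_nodup_inv_keys ps).filter _)]
  intro s
  rw [pv_mem_grp, List.mem_filter]
  constructor
  · intro h
    refine ⟨?_, by simpa using h⟩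
    rw [pvInv_keys, PySem.Set.mem_ofList]
    exact List.mem_map.mpr ⟨(a, s), h, rfl⟩
  · rintro ⟨_, h⟩
    simpa using h

theorem pv_inter_len (ps : List (Char × String)) (a b : Char) :
    ((pvGrp ps a).countP (fun s => decide (s ∈ pvGrp ps b))) = pvKeyCnt ps a b := by
  unfold pvKeyCnt
  rw [List.countP_eq_length_filter, List.countP_eq_length_filter]
  apply List.Perm.length_eq
  rw [List.perm_ext_iff_of_nodup ((pv_nodup_grp ps a).filter _) ((pv_nodup_inv_keys ps).filter _)]
  intro s
  rw [List.mem_filter, List.mem_filter]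
  constructor
  · rintro ⟨h1, h2⟩
    rw [pv_mem_grp] at h1
    rw [decide_eq_true_iff, pv_mem_grp] at h2
    refine ⟨?_, by simp [h1, h2]⟩
    rw [pvInv_keys, PySem.Set.mem_ofList]
    exact List.mem_map.mpr ⟨(a, s), h1, rfl⟩
  · rintro ⟨_, h⟩
    rw [decide_eq_true_iff] at h
    exact ⟨(pv_mem_grp ps a s).mpr h.1, by rw [decide_eq_true_iff, pv_mem_grp]; exact h.2⟩

theorem pv_diff_len (ps : List (Char × String)) (a b : Char) :
    PySem.Set.len (PySem.Set.diff (pvGrp ps a) (pvGrp ps b))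
    = ((pvGrp ps a).length : Int) - (pvKeyCnt ps a b : Int) := by
  have hsplit := List.length_eq_countP_add_countP (fun s => PySem.Set.contains (pvGrp ps b) s)
    (l := pvGrp ps a)
  have hcnt : (pvGrp ps a).countP (fun s => PySem.Set.contains (pvGrp ps b) s) = pvKeyCnt ps a b := by
    rw [← pv_inter_len ps a b]
    apply List.countP_congr
    intro s _
    rw [PySem.Set.contains_iff, decide_eq_true_iff]
  have hdiff : PySem.Set.len (PySem.Set.diff (pvGrp ps a) (pvGrp ps b))
      = ((pvGrp ps a).countP (fun s => !PySem.Set.contains (pvGrp ps b) s) : Int) := by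
    show (((pvGrp ps a).filter _).length : Int) = _
    rw [List.countP_eq_length_filter]
  have hneg : (pvGrp ps a).countP (fun s => !PySem.Set.contains (pvGrp ps b) s)
      = (pvGrp ps a).countP (fun s => decide ¬ (PySem.Set.contains (pvGrp ps b) s = true)) := by
    apply List.countP_congr
    intro s _
    simp
  rw [hdiff, hneg]
  omega

-- B's tables evaluated: size and shared over inv.values
theorem pv_sizeTable (ps : List (Char × String)) (a : Char) :
    ((pvInv ps).values.foldl (fun d ls => ls.foldl (fun d c => d.insert c (d.getD c 0 + 1)) d) PySem.Dict.empty).getD a 0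
    = ((pvGrp ps a).length : Int) := by
  rw [pv_vals_eq, pv_size_getD, PySem.Dict.getD_empty, List.map_map]
  have hcong : ((pvInv ps).keys).map ((fun ls => ((ls : PySem.Set Char).count a : Int)) ∘
        (fun s => (pvInv ps).getD s PySem.Set.empty))
      = ((pvInv ps).keys).map (fun s => if decide ((a, s) ∈ ps) = true then (1 : Int) else 0) := by
    apply List.map_congr_left
    intro s _
    simp only [Function.comp]
    by_cases h : (a, s) ∈ ps
    · rw [List.count_eq_one_of_mem (pv_nodup_inv ps s) ((pv_mem_inv ps s a).mpr h)]
      simp [h]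
    · rw [List.count_eq_zero.mpr (fun hc => h ((pv_mem_inv ps s a).mp hc))]
      simp [h]
  rw [hcong, PySem.List.sum_map_ite_one_zero, ← pv_grp_len]
  simp

theorem pv_sharedTable (ps : List (Char × String)) (a b : Char) (hab : a ≠ b) :
    ((pvInv ps).values.foldl (fun d ls => (pvPairsOf ls).foldl (fun d p =>
        d.insert (canonPair p.1 p.2) (d.getD (canonPair p.1 p.2) 0 + 1)) d) PySem.Dict.empty).getD (canonPair a b) 0
    = (pvKeyCnt ps a b : Int) := by
  have haux : ∀ (x y : Char), x < y →
      ((pvInv ps).values.foldl (fun d ls => (pvPairsOf ls).foldl (fun d p =>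
          d.insert (canonPair p.1 p.2) (d.getD (canonPair p.1 p.2) 0 + 1)) d) PySem.Dict.empty).getD (x, y) 0
      = (((pvInv ps).keys).countP (fun s => decide ((x, s) ∈ ps ∧ (y, s) ∈ ps)) : Int) := by
    intro x y hxy
    rw [pv_vals_eq, pv_shared_getD, PySem.Dict.getD_empty, List.map_map]
    have hcong : ((pvInv ps).keys).map ((fun ls => ((((pvPairsOf ls).map (fun p => canonPair p.1 p.2)).count (x, y) : Int))) ∘
          (fun s => (pvInv ps).getD s PySem.Set.empty))
        = ((pvInv ps).keys).map (fun s => if decide ((x, s) ∈ ps ∧ (y, s) ∈ ps) = true then (1 : Int) else 0) := by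
      apply List.map_congr_left
      intro s _
      simp only [Function.comp]
      rw [pv_pairsOf_canon_count x y hxy _ (pv_nodup_inv ps s)]
      simp only [pv_mem_inv]
      by_cases hx : (x, s) ∈ ps
      · by_cases hy : (y, s) ∈ ps
        · simp [hx, hy]
        · simp [hx, hy]
      · simp [hx]
    rw [hcong, PySem.List.sum_map_ite_one_zero]
    simp
  unfold pvKeyCnt
  rcases lt_trichotomy a b with hlt | heq | hgt
  · rw [show canonPair a b = (a, b) from by unfold canonPair; rw [if_pos hlt]]
    exact haux a b hlt
  · exact absurd heq hab
  · rw [show canonPair a b = (b, a) from by unfold canonPair; rw [if_neg (asymm hgt)]]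
    rw [haux b a hgt]
    congr 1
    exact_mod_cast List.countP_congr (fun s _ => by simp [and_comm])

theorem pv_pyRange_pairs {β : Type} (xs : List Char) (g : β → Char → Char → β) (d0 : β) :
    (PySem.List.pyRange 0 (PySem.List.len xs) 1).foldl (fun d i =>
      (PySem.List.pyRange (i + 1) (PySem.List.len xs) 1).foldl (fun d j =>
        g d (PySem.List.pyGetD xs i ' ') (PySem.List.pyGetD xs j ' ')) d) d0
    = (pvPairsOf xs).foldl (fun d p => g d p.1 p.2) d0 := by
  have h := pv_pyRange_pairs_aux xs g xs 0 (by simp) d0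
  simpa using h

theorem pv_enumerate_foldl_snd {β : Type} (ls : List Char) (h : β → Char → β) (d : β) :
    (PySem.List.enumerate ls).foldl (fun d ia => h d ia.2) d = ls.foldl h d := by
  have hm : ∀ (k : Int), (PySem.List.enumerate ls k).map (·.2) = ls := by
    induction ls with
    | nil => intro k; simp [PySem.List.enumerate]
    | cons a t ih => intro k; simp [PySem.List.enumerate, ih]
  rw [← List.foldl_map (f := fun ia : Int × Char => ia.2) (g := h), hm]

theorem pv_keyCnt_comm (ps : List (Char × String)) (a b : Char) :
    pvKeyCnt ps a b = pvKeyCnt ps b a := by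
  unfold pvKeyCnt
  exact List.countP_congr (fun s _ => by simp [and_comm])

-- ===== VERDICT (by name: the statement is the Claim_ definition above) =====
theorem distinctNames_v3_spec : Claim_equal_distinctNames_v3 := by
  intro ideas _ _
  unfold Spec_distinctNames_v3
  simp only [distinctNames_v3, distinctNames_v3_alt]
  rw [pvA_dct_eq, pvB_first_eq]
  dsimp only
  have hq : (fun (q : PySem.Dict Char Int × PySem.Dict (Char × Char) Int) (ls : PySem.Set Char) =>
      (PySem.List.enumerate ls).foldl (fun q ia =>
        (q.1.insert ia.2 (q.1.getD ia.2 0 + 1),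
         (PySem.List.slice ls (some (ia.1 + 1)) none).foldl (fun sh b =>
           sh.insert (canonPair ia.2 b) (sh.getD (canonPair ia.2 b) 0 + 1)) q.2)) q)
      = (fun q ls =>
        ((PySem.List.enumerate ls).foldl (fun d ia => d.insert ia.2 (d.getD ia.2 0 + 1)) q.1,
         (PySem.List.enumerate ls).foldl (fun sh ia =>
           (PySem.List.slice ls (some (ia.1 + 1)) none).foldl (fun sh b =>
             sh.insert (canonPair ia.2 b) (sh.getD (canonPair ia.2 b) 0 + 1)) sh) q.2)) := by
    funext q ls
    exact PySem.List.foldl_prod_mk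
      (f := fun (d : PySem.Dict Char Int) (ia : Int × Char) => d.insert ia.2 (d.getD ia.2 0 + 1))
      (g := fun (sh : PySem.Dict (Char × Char) Int) (ia : Int × Char) =>
        (PySem.List.slice ls (some (ia.1 + 1)) none).foldl (fun sh b =>
          sh.insert (canonPair ia.2 b) (sh.getD (canonPair ia.2 b) 0 + 1)) sh)
      _ _ _
  rw [hq]
  rw [PySem.List.foldl_prod_mk
    (f := fun (d : PySem.Dict Char Int) (ls : PySem.Set Char) =>
      (PySem.List.enumerate ls).foldl (fun d ia => d.insert ia.2 (d.getD ia.2 0 + 1)) d)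
    (g := fun (sh : PySem.Dict (Char × Char) Int) (ls : PySem.Set Char) =>
      (PySem.List.enumerate ls).foldl (fun sh ia =>
        (PySem.List.slice ls (some (ia.1 + 1)) none).foldl (fun sh b =>
          sh.insert (canonPair ia.2 b) (sh.getD (canonPair ia.2 b) 0 + 1)) sh) sh)]
  dsimp only
  have hsize : ((pvInv (pvPairs ideas)).values.foldl (fun d ls =>
      (PySem.List.enumerate ls).foldl (fun d ia => d.insert ia.2 (d.getD ia.2 0 + 1)) d)
      (PySem.Dict.empty : PySem.Dict Char Int))
      = (pvInv (pvPairs ideas)).values.foldl (fun (d : PySem.Dict Char Int) ls =>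
          ls.foldl (fun d c => d.insert c (d.getD c 0 + 1)) d) PySem.Dict.empty := by
    exact PySem.List.foldl_congr_mem _ _ _ _
      (fun acc ls _ => pv_enumerate_foldl_snd ls (fun d c => d.insert c (d.getD c 0 + 1)) acc)
  have hshared : ((pvInv (pvPairs ideas)).values.foldl (fun sh ls =>
      (PySem.List.enumerate ls).foldl (fun sh ia =>
        (PySem.List.slice ls (some (ia.1 + 1)) none).foldl (fun sh b =>
          sh.insert (canonPair ia.2 b) (sh.getD (canonPair ia.2 b) 0 + 1)) sh) sh)
      (PySem.Dict.empty : PySem.Dict (Char × Char) Int))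
      = (pvInv (pvPairs ideas)).values.foldl (fun (d : PySem.Dict (Char × Char) Int) ls =>
          (pvPairsOf ls).foldl (fun d p =>
            d.insert (canonPair p.1 p.2) (d.getD (canonPair p.1 p.2) 0 + 1)) d) PySem.Dict.empty := by
    exact PySem.List.foldl_congr_mem _ _ _ _
      (fun acc ls _ => pv_enum_slice_foldl ls
        (fun d a b => d.insert (canonPair a b) (d.getD (canonPair a b) 0 + 1)) acc)
  rw [hsize, hshared, ← pvA_keys]
  set sizeT := (pvInv (pvPairs ideas)).values.foldl (fun (d : PySem.Dict Char Int) ls =>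
      ls.foldl (fun d c => d.insert c (d.getD c 0 + 1)) d) PySem.Dict.empty with hsizeT
  set sharedT := (pvInv (pvPairs ideas)).values.foldl (fun (d : PySem.Dict (Char × Char) Int) ls =>
      (pvPairsOf ls).foldl (fun d p =>
        d.insert (canonPair p.1 p.2) (d.getD (canonPair p.1 p.2) 0 + 1)) d) PySem.Dict.empty with hsharedT
  rw [pv_enum_slice_foldl ((pvDct (pvPairs ideas)).keys)
    (fun c a b => c + (sizeT.getD a 0 - sharedT.getD (canonPair a b) 0) *
      (sizeT.getD b 0 - sharedT.getD (canonPair a b) 0) * 2) 0]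
  rw [pv_pyRange_pairs ((pvDct (pvPairs ideas)).keys)
    (fun c a b => c + (((pvDct (pvPairs ideas)).getD a PySem.Set.empty).diff
        ((pvDct (pvPairs ideas)).getD b PySem.Set.empty)).len *
      (((pvDct (pvPairs ideas)).getD b PySem.Set.empty).diff
        ((pvDct (pvPairs ideas)).getD a PySem.Set.empty)).len * 2) 0]
  apply PySem.List.foldl_congr_mem
  intro acc p hp
  rw [hsizeT, hsharedT]
  have hnd : ((pvDct (pvPairs ideas)).keys).Nodup := by
    rw [pvA_keys]; exact PySem.Set.nodup_ofList _
  have hne := pv_pairsOf_ne _ hnd p hp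
  show acc + _ = acc + _
  rw [show (pvDct (pvPairs ideas)).getD p.1 PySem.Set.empty = pvGrp (pvPairs ideas) p.1 from rfl,
      show (pvDct (pvPairs ideas)).getD p.2 PySem.Set.empty = pvGrp (pvPairs ideas) p.2 from rfl]
  rw [pv_diff_len (pvPairs ideas) p.1 p.2, pv_diff_len (pvPairs ideas) p.2 p.1]
  rw [pv_sizeTable (pvPairs ideas) p.1, pv_sizeTable (pvPairs ideas) p.2]
  rw [pv_sharedTable (pvPairs ideas) p.1 p.2 hne]
  rw [pv_keyCnt_comm (pvPairs ideas) p.2 p.1]
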